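-- pv_equiv track=rewrite | github.com/selfreferencing/erdos-86-lean | k13_coverage_analysis.py | has_type_ii_witness
-- ===== SOURCE A (Python) =====
-- from math import gcd, isqrt, log2
--
-- def divisors(n):
--     """Return all divisors of n."""
--     divs = []
--     for i in range(1, isqrt(n) + 1):
--         if n % i == 0:
--             divs.append(i)
--             if i != n // i:
--                 divs.append(n // i)
--     return sorted(divs)
--
-- def divisors_up_to(n, limit):
--     """Return divisors of n that are <= limit."""
--     return [d for d in divisors(n) if d <= limit]
--
-- def m_k(k):
--     """Return m_k = 4k + 3."""
--     return 4 * k + 3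
--
-- def x_k(p, k):
--     """Return x_k = (p + m_k)/4 if divisible, else None."""
--     m = m_k(k)
--     if (p + m) % 4 == 0:
--         return (p + m) // 4
--     return None
--
-- def is_witness(d, x, m):
--     """Check if d is a Type II witness: d | x², d ≤ x, d ≡ -x (mod m)."""
--     return (x * x) % d == 0 and d <= x and (d + x) % m == 0
--
-- def has_type_ii_witness(p, k):
--     """Check if k provides a Type II witness for prime p."""
--     m = m_k(k)
--     x = x_k(p, k)
--     if x is None:
--         return False, None
--     # Check all divisors of x² up to x
--     x_sq = x * x
--     for d in divisors_up_to(x_sq, x):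
--         if is_witness(d, x, m):
--             return True, d
--     return False, None
-- ===== SOURCE B (Python) =====
-- def has_type_ii_witness(p, k):
--     """Check if k provides a Type II witness for prime p.
--
--     Instead of enumerating all divisors of x**2 up to x (O(x) trial
--     divisions plus a sort), walk only the arithmetic progression of
--     candidates d with d == -x (mod |m|), 1 <= d <= x, in increasing
--     order, and return the first one dividing x**2.
--     """
--     m = 4 * k + 3
--     if (p + m) % 4 != 0:
--         return False, None
--     x = (p + m) // 4
--     if x <= 0:
--         return False, None
--     x_sq = x * x
--     mm = abs(m)
--     start = (-x) % mm
--     if start == 0: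
--         start = mm
--     for d in range(start, x + 1, mm):
--         if x_sq % d == 0:
--             return True, d
--     return False, None
-- ===== Notes on version B (the rewrite author's own statement) =====
-- stated objective: faster
-- what changed: Instead of enumerating and sorting all divisors of x^2 (isqrt(x^2)=x trial divisions) and then scanning them for the congruence d == -x (mod m), B walks only the arithmetic progression of candidates d with d == -x (mod |m|), 1 <= d <= x, in increasing order and returns the first one dividing x^2.
import Mathlib
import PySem

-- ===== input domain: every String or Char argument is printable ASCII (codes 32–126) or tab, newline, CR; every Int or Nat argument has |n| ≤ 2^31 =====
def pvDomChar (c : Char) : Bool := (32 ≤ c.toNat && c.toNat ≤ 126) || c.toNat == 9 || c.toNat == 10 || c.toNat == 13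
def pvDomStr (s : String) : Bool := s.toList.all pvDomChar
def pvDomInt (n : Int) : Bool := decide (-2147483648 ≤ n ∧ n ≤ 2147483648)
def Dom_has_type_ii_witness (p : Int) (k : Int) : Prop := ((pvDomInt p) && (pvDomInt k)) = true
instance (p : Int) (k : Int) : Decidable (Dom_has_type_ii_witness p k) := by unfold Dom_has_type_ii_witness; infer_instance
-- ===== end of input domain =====

-- B replaces A's full divisor enumeration of x² (isqrt(x²)=|x| trial divisions plus a sort)
-- by a scan of only the arithmetic progression d ≡ -x (mod |m|), 1 ≤ d ≤ x; objective: faster.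

-- ===== PORT A =====
-- math.isqrt(n) = floor square root; exact for 0 ≤ n (the only arguments A passes it)
def pyIsqrt (n : Int) : Int := ((Int.toNat n).sqrt : Int)

-- divisors(n): trial division up to isqrt(n), collecting i and n // i, then sorted
def pvDivisors (n : Int) : List Int :=
  let divs : List Int :=
    (PySem.List.pyRange 1 (pyIsqrt n + 1) 1).foldl
      (fun divs i =>
        if PySem.Int.mod n i == 0 then
          let divs := divs ++ [i]
          if i != PySem.Int.floordiv n i then divs ++ [PySem.Int.floordiv n i]
          else divs
        else divs)
      []
  PySem.List.sorted divs (fun d => d)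

-- divisors_up_to(n, limit)
def pvDivisorsUpTo (n : Int) (limit : Int) : List Int :=
  (pvDivisors n).filter (fun d => decide (d ≤ limit))

-- m_k(k)
def pvMK (k : Int) : Int := 4 * k + 3

-- x_k(p, k)
def pvXK (p : Int) (k : Int) : Option Int :=
  let m := pvMK k
  if PySem.Int.mod (p + m) 4 == 0 then some (PySem.Int.floordiv (p + m) 4) else none

-- is_witness(d, x, m)
def pvIsWitness (d : Int) (x : Int) (m : Int) : Bool :=
  PySem.Int.mod (x * x) d == 0 && decide (d ≤ x) && PySem.Int.mod (d + x) m == 0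

-- the for-loop with early return: first divisor that is a witness
def has_type_ii_witness (p : Int) (k : Int) : Bool × Option Int :=
  let m := pvMK k
  match pvXK p k with
  | none => (false, none)
  | some x =>
    let xSq := x * x
    match (pvDivisorsUpTo xSq x).find? (fun d => pvIsWitness d x m) with
    | some d => (true, some d)
    | none => (false, none)

-- ===== PORT B =====
-- the for-loop of B: first candidate of the progression dividing x²
def pvAltScan (xSq : Int) (cands : List Int) : Bool × Option Int :=
  match cands.find? (fun d => PySem.Int.mod xSq d == 0) with
  | some d => (true, some d)
  | none => (false, none)

def has_type_ii_witness_alt (p : Int) (k : Int) : Bool × Option Int :=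
  let m := 4 * k + 3
  if PySem.Int.mod (p + m) 4 ≠ 0 then (false, none)
  else
    let x := PySem.Int.floordiv (p + m) 4
    if x ≤ 0 then (false, none)
    else
      let xSq := x * x
      let mm := |m|
      let start0 := PySem.Int.mod (-x) mm
      let start := if start0 == 0 then mm else start0
      pvAltScan xSq (PySem.List.pyRange start (x + 1) mm)

-- ===== PRECONDITION & SPEC =====
def Spec_has_type_ii_witness (p : Int) (k : Int) (out : Bool × Option Int) : Prop := out = has_type_ii_witness_alt p k
instance (p : Int) (k : Int) (out : Bool × Option Int) : Decidable (Spec_has_type_ii_witness p k out) := by unfold Spec_has_type_ii_witness; infer_instance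

-- ===== CLAIM (what is proved, stated in full; the proofs are below) =====
def Claim_equal_has_type_ii_witness : Prop := ∀ (p : Int) (k : Int), Dom_has_type_ii_witness p k → Spec_has_type_ii_witness p k (has_type_ii_witness p k)

-- ===== LEMMAS AND PROOFS =====

-- the per-iteration contribution of A's divisor-collecting loop
def gDiv (n : Int) (i : Int) : List Int :=
  if PySem.Int.mod n i == 0 then
    (if i != PySem.Int.floordiv n i then [i, PySem.Int.floordiv n i] else [i])
  else []

lemma divisors_eq_sorted_flatMap (n : Int) :
    pvDivisors n =
      PySem.List.sorted ((PySem.List.pyRange 1 (pyIsqrt n + 1) 1).flatMap (gDiv n)) (fun d => d) := by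
  unfold pvDivisors
  have hbody : (fun (divs : List Int) (i : Int) =>
      if PySem.Int.mod n i == 0 then
        let divs := divs ++ [i]
        if i != PySem.Int.floordiv n i then divs ++ [PySem.Int.floordiv n i]
        else divs
      else divs) = fun acc i => acc ++ gDiv n i := by
    funext acc i
    simp only [gDiv]
    split_ifs with h1 h2 <;> simp
  rw [hbody, PySem.List.foldl_append_eq_flatMap]
  simp

lemma le_isqrt_iff {n i : Int} (hn : 0 ≤ n) (hi : 1 ≤ i) : i ≤ pyIsqrt n ↔ i * i ≤ n := by
  unfold pyIsqrt
  obtain ⟨a, rfl⟩ : ∃ a : Nat, i = (a : Int) := ⟨i.toNat, (Int.toNat_of_nonneg (by omega)).symm⟩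
  obtain ⟨nn, rfl⟩ : ∃ nn : Nat, n = (nn : Int) := ⟨n.toNat, (Int.toNat_of_nonneg hn).symm⟩
  rw [Int.toNat_natCast]
  constructor
  · intro h
    have : a ≤ nn.sqrt := by exact_mod_cast h
    exact_mod_cast Nat.le_sqrt.mp this
  · intro h
    have : a * a ≤ nn := by exact_mod_cast h
    exact_mod_cast Nat.le_sqrt.mpr this

-- characterization of A's divisors list: exactly the positive divisors of n (for n > 0)
lemma mem_divisors_iff {n : Int} (hn : 0 < n) (d : Int) :
    d ∈ pvDivisors n ↔ 1 ≤ d ∧ d ∣ n := by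
  rw [divisors_eq_sorted_flatMap, PySem.List.mem_sorted, List.mem_flatMap]
  constructor
  · rintro ⟨i, hi, hd⟩
    rw [PySem.List.mem_pyRange_one] at hi
    obtain ⟨hi1, _⟩ := hi
    unfold gDiv at hd
    by_cases hmod : PySem.Int.mod n i == 0
    · have hdvd : i ∣ n := (PySem.Int.mod_eq_zero_iff_dvd n i).mp (by simpa using hmod)
      rw [if_pos hmod] at hd
      have hfd : PySem.Int.floordiv n i = n / i :=
        PySem.Int.floordiv_eq_ediv_of_pos (by omega)
      obtain ⟨c, hc⟩ := hdvd
      have hi0 : i ≠ 0 := by omega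
      have hni : n / i = c := by rw [hc, Int.mul_ediv_cancel_left _ hi0]
      have hc1 : 1 ≤ c := by nlinarith [hc]
      have hcdvd : c ∣ n := ⟨i, by rw [hc]; ring⟩
      split_ifs at hd <;> simp at hd
      · rcases hd with rfl | rfl
        · exact ⟨hi1, ⟨c, hc⟩⟩
        · rw [hfd, hni]; exact ⟨hc1, hcdvd⟩
      · rcases hd with rfl
        exact ⟨hi1, ⟨c, hc⟩⟩
    · rw [if_neg hmod] at hd; simp at hd
  · rintro ⟨hd1, hdvd⟩
    have hd0 : d ≠ 0 := by omega
    obtain ⟨c, hc⟩ := hdvd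
    have hc1 : 1 ≤ c := by nlinarith [hc]
    have hnc : n / d = c := by rw [hc, Int.mul_ediv_cancel_left _ hd0]
    by_cases hds : d ≤ pyIsqrt n
    · refine ⟨d, ?_, ?_⟩
      · rw [PySem.List.mem_pyRange_one]; omega
      · unfold gDiv
        have hmod : PySem.Int.mod n d == 0 := by
          simp only [beq_iff_eq]
          exact (PySem.Int.mod_eq_zero_iff_dvd n d).mpr ⟨c, hc⟩
        rw [if_pos hmod]
        split_ifs <;> simp
    · -- d > isqrt n : use the cofactor c as the loop index
      have hdd : n < d * d := by
        by_contra hcon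
        exact hds ((le_isqrt_iff (by omega) hd1).mpr (by omega))
      have hcd : c < d := by nlinarith [hc]
      have hcs : c ≤ pyIsqrt n := (le_isqrt_iff (by omega) hc1).mpr (by nlinarith [hc])
      refine ⟨c, ?_, ?_⟩
      · rw [PySem.List.mem_pyRange_one]; omega
      · unfold gDiv
        have hc0 : c ≠ 0 := by omega
        have hmodc : PySem.Int.mod n c == 0 := by
          simp only [beq_iff_eq]
          exact (PySem.Int.mod_eq_zero_iff_dvd n c).mpr ⟨d, by rw [hc]; ring⟩
        rw [if_pos hmodc]
        have hfc : PySem.Int.floordiv n c = d := by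
          rw [PySem.Int.floordiv_eq_ediv_of_pos (by omega), hc, mul_comm,
            Int.mul_ediv_cancel_left _ hc0]
        have hne : (c != PySem.Int.floordiv n c) = true := by
          rw [hfc]; simp; omega
        rw [if_pos hne, hfc]; simp

lemma divisors_zero : pvDivisors 0 = [] := by decide

lemma divisors_pairwise (n : Int) : (pvDivisors n).Pairwise (fun a b => a ≤ b) := by
  rw [divisors_eq_sorted_flatMap]
  exact PySem.List.sorted_pairwise _ _

-- first match of a sorted list is minimal among all matches
lemma find?_min {l : List Int} (hl : l.Pairwise (fun a b => a ≤ b)) {P : Int → Bool} {d : Int}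
    (h : l.find? P = some d) : ∀ e ∈ l, P e = true → d ≤ e := by
  induction l with
  | nil => simp at h
  | cons a t ih =>
    obtain ⟨ha, ht⟩ := List.pairwise_cons.mp hl
    by_cases hPa : P a = true
    · rw [List.find?_cons_of_pos hPa] at h
      cases h
      intro e he _
      rcases List.mem_cons.mp he with rfl | he'
      · exact le_refl _
      · exact ha e he'
    · rw [List.find?_cons_of_neg hPa] at h
      intro e he hPe
      rcases List.mem_cons.mp he with rfl | he'
      · exact absurd hPe hPa
      · exact ih ht h e he' hPe

-- two sorted lists whose matching elements form the same set have the same first match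
lemma find?_eq_find?_of_same_matches {la lb : List Int}
    (hla : la.Pairwise (fun a b => a ≤ b)) (hlb : lb.Pairwise (fun a b => a ≤ b))
    {P Q : Int → Bool} {S : Int → Prop}
    (hA : ∀ d, (d ∈ la ∧ P d = true) ↔ S d)
    (hB : ∀ d, (d ∈ lb ∧ Q d = true) ↔ S d) :
    la.find? P = lb.find? Q := by
  cases hfa : la.find? P with
  | none =>
    cases hfb : lb.find? Q with
    | none => rfl
    | some db =>
      have hSb : S db := (hB db).mp ⟨List.mem_of_find?_eq_some hfb, List.find?_some hfb⟩
      obtain ⟨hmem, hP⟩ := (hA db).mpr hSb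
      exact absurd hP (List.find?_eq_none.mp hfa db hmem)
  | some da =>
    have hSa : S da := (hA da).mp ⟨List.mem_of_find?_eq_some hfa, List.find?_some hfa⟩
    cases hfb : lb.find? Q with
    | none =>
      obtain ⟨hmem, hQ⟩ := (hB da).mpr hSa
      exact absurd hQ (List.find?_eq_none.mp hfb da hmem)
    | some db =>
      have hSb : S db := (hB db).mp ⟨List.mem_of_find?_eq_some hfb, List.find?_some hfb⟩
      obtain ⟨hmemA, hPb⟩ := (hA db).mpr hSb
      obtain ⟨hmemB, hQa⟩ := (hB da).mpr hSa
      have h1 : da ≤ db := find?_min hla hfa db hmemA hPb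
      have h2 : db ≤ da := find?_min hlb hfb da hmemB hQa
      rw [le_antisymm h1 h2]

-- the arithmetic progression is sorted
lemma pyRange_pairwise_le {a b s : Int} (hs : 0 < s) :
    (PySem.List.pyRange a b s).Pairwise (fun x y => x ≤ y) := by
  rw [PySem.List.pyRange_of_pos a b hs, List.pairwise_map]
  refine List.pairwise_lt_range.imp ?_
  intro x y hxy
  have hxy' : (x : Int) ≤ (y : Int) := by exact_mod_cast Nat.le_of_lt hxy
  nlinarith

-- A's scan finds nothing when x ≤ 0
lemma find_none_of_nonpos (m x : Int) (hx : x ≤ 0) :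
    (pvDivisorsUpTo (x * x) x).find? (fun d => pvIsWitness d x m) = none := by
  rw [List.find?_eq_none]
  intro d hd _
  unfold pvDivisorsUpTo at hd
  rw [List.mem_filter] at hd
  obtain ⟨hdm, hdle⟩ := hd
  by_cases hx0 : x = 0
  · rw [hx0] at hdm
    simp only [mul_zero] at hdm
    rw [divisors_zero] at hdm
    simp at hdm
  · have hxx : 0 < x * x := mul_self_pos.mpr hx0
    obtain ⟨h1, _⟩ := (mem_divisors_iff hxx d).mp hdm
    simp only [decide_eq_true_eq] at hdle
    omega

-- the heart: both scans compute the first element of the same candidate set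
lemma main_case (m x : Int) (hm : m ≠ 0) (hx : 0 < x) :
    (pvDivisorsUpTo (x * x) x).find? (fun d => pvIsWitness d x m) =
    (PySem.List.pyRange
        (if PySem.Int.mod (-x) |m| == 0 then |m| else PySem.Int.mod (-x) |m|)
        (x + 1) |m|).find? (fun d => PySem.Int.mod (x * x) d == 0) := by
  have hmm : 0 < |m| := abs_pos.mpr hm
  set mm := |m| with hmmdef
  set start0 := PySem.Int.mod (-x) mm with hs0
  set start := if start0 == 0 then mm else start0 with hstart
  have hs0n : 0 ≤ start0 := PySem.Int.mod_nonneg _ hmm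
  have hs0l : start0 < mm := PySem.Int.mod_lt _ hmm
  have hs0dvd : mm ∣ start0 + x := by
    refine ⟨-((-x) / mm), ?_⟩
    rw [hs0, PySem.Int.mod_eq_emod_of_pos hmm, Int.emod_def]
    ring
  have hst1 : 1 ≤ start := by
    rw [hstart]; split_ifs with h0
    · omega
    · simp only [beq_iff_eq] at h0; omega
  have hstmm : start ≤ mm := by
    rw [hstart]; split_ifs <;> omega
  have hstdvd : mm ∣ start + x := by
    rw [hstart]; split_ifs with h0
    · simp only [beq_iff_eq] at h0
      have : start0 + x = x := by omega
      have h2 : mm ∣ x := by rw [← this]; exact hs0dvd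
      exact dvd_add (dvd_refl mm) h2
    · exact hs0dvd
  have hxx : 0 < x * x := mul_self_pos.mpr (by omega)
  have hla : (pvDivisorsUpTo (x * x) x).Pairwise (fun a b => a ≤ b) :=
    (divisors_pairwise (x * x)).filter _
  have hlb := pyRange_pairwise_le (a := start) (b := x + 1) hmm
  have hA : ∀ d, (d ∈ pvDivisorsUpTo (x * x) x ∧ (pvIsWitness d x m) = true) ↔
      (1 ≤ d ∧ d ≤ x ∧ d ∣ x * x ∧ mm ∣ d + x) := by
    intro d
    unfold pvDivisorsUpTo pvIsWitness
    rw [List.mem_filter]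
    constructor
    · rintro ⟨⟨hdm, hdle⟩, hw⟩
      obtain ⟨h1, h2⟩ := (mem_divisors_iff hxx d).mp hdm
      simp only [decide_eq_true_eq] at hdle
      simp only [Bool.and_eq_true, beq_iff_eq, decide_eq_true_eq] at hw
      refine ⟨h1, hdle, h2, ?_⟩
      rw [hmmdef, abs_dvd]
      exact (PySem.Int.mod_eq_zero_iff_dvd _ _).mp hw.2
    · rintro ⟨h1, h2, h3, h4⟩
      refine ⟨⟨(mem_divisors_iff hxx d).mpr ⟨h1, h3⟩, by simpa using h2⟩, ?_⟩
      simp only [Bool.and_eq_true, beq_iff_eq, decide_eq_true_eq]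
      refine ⟨⟨(PySem.Int.mod_eq_zero_iff_dvd _ _).mpr h3, h2⟩, ?_⟩
      have h4' : m ∣ d + x := by rwa [hmmdef, abs_dvd] at h4
      exact (PySem.Int.mod_eq_zero_iff_dvd _ _).mpr h4'
  have hB : ∀ d, (d ∈ PySem.List.pyRange start (x + 1) mm ∧
      (PySem.Int.mod (x * x) d == 0) = true) ↔
      (1 ≤ d ∧ d ≤ x ∧ d ∣ x * x ∧ mm ∣ d + x) := by
    intro d
    rw [PySem.List.mem_pyRange_iff_of_pos hmm]
    constructor
    · rintro ⟨⟨hge, hlt, hdvd⟩, hq⟩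
      have hdx : mm ∣ d + x := by
        have heq : d + x = (d - start) + (start + x) := by ring
        rw [heq]; exact dvd_add hdvd hstdvd
      refine ⟨by omega, by omega, ?_, hdx⟩
      exact (PySem.Int.mod_eq_zero_iff_dvd _ _).mp (by simpa using hq)
    · rintro ⟨h1, h2, h3, h4⟩
      have hdvd : mm ∣ d - start := by
        have heq : d - start = (d + x) - (start + x) := by ring
        rw [heq]; exact dvd_sub h4 hstdvd
      have hge : start ≤ d := by
        obtain ⟨t, ht⟩ := hdvd
        by_cases h : 0 ≤ t
        · nlinarith
        · have h' : t ≤ -1 := by omega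
          nlinarith
      refine ⟨⟨hge, by omega, hdvd⟩, ?_⟩
      simpa using (PySem.Int.mod_eq_zero_iff_dvd _ _).mpr h3
  exact find?_eq_find?_of_same_matches hla hlb hA hB

theorem has_type_ii_witness_spec_aux (p k : Int) :
    has_type_ii_witness p k = has_type_ii_witness_alt p k := by
  by_cases h4 : PySem.Int.mod (p + (4 * k + 3)) 4 = 0
  · have hb : (PySem.Int.mod (p + (4 * k + 3)) 4 == 0) = true := by simpa using h4
    simp only [has_type_ii_witness, has_type_ii_witness_alt, pvXK, pvMK,
      ne_eq, h4, not_true_eq_false, if_false, ite_true, ite_false, beq_self_eq_true,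
      eq_self_iff_true]
    set x := PySem.Int.floordiv (p + (4 * k + 3)) 4 with hxdef
    by_cases hxpos : x ≤ 0
    · rw [if_pos hxpos, find_none_of_nonpos _ _ hxpos]
    · rw [if_neg hxpos]
      unfold pvAltScan
      rw [main_case (4 * k + 3) x (by omega) (by omega)]
  · have hb : (PySem.Int.mod (p + (4 * k + 3)) 4 == 0) = false := by simpa using h4
    simp only [has_type_ii_witness, has_type_ii_witness_alt, pvXK, pvMK, hb, ne_eq, h4,
      not_false_eq_true, if_true, Bool.false_eq_true, if_false]

-- ===== VERDICT (by name: the statement is the Claim_ definition above) =====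
theorem has_type_ii_witness_spec : Claim_equal_has_type_ii_witness := by
  intro p k _
  unfold Spec_has_type_ii_witness
  exact has_type_ii_witness_spec_aux p k
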